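-- pv_equiv track=rewrite | github.com/bhumikaa04/ai-code-reviewer | agent/fix_library.py | fix_infinite_loop
-- ===== SOURCE A (Python) =====
-- def fix_infinite_loop(code: str) -> str:
--     """Add safety to while loops"""
--     lines = code.split('\n')
--     fixed = []
--     for line in lines:
--         if 'while True:' in line:
--             fixed.append('    counter = 0')
--             fixed.append('    while counter < 1000:  # Safety limit')
--             fixed.append('        counter += 1')
--         else:
--             fixed.append(line)
--     return '\n'.join(fixed)
-- ===== SOURCE B (Python) =====
-- def fix_infinite_loop(code: str) -> str:
--     """Add safety to while loops (single streaming pass, no split/join-with-separator)."""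
--     REPL = '    counter = 0\n    while counter < 1000:  # Safety limit\n        counter += 1'
--     out = []
--     cur = []
--     for ch in code:
--         if ch == '\n':
--             seg = ''.join(cur)
--             out.append(REPL if 'while True:' in seg else seg)
--             out.append('\n')
--             cur = []
--         else:
--             cur.append(ch)
--     seg = ''.join(cur)
--     out.append(REPL if 'while True:' in seg else seg)
--     return ''.join(out)
-- ===== Notes on version B (the rewrite author's own statement) =====
-- stated objective: alternative
-- what changed: Replaces A's split-into-lines / rebuild-list / join-with-separator pipeline with a single streaming character pass that emits each finished segment (replaced or kept) and its terminator directly into the output buffer.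
import Mathlib
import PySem

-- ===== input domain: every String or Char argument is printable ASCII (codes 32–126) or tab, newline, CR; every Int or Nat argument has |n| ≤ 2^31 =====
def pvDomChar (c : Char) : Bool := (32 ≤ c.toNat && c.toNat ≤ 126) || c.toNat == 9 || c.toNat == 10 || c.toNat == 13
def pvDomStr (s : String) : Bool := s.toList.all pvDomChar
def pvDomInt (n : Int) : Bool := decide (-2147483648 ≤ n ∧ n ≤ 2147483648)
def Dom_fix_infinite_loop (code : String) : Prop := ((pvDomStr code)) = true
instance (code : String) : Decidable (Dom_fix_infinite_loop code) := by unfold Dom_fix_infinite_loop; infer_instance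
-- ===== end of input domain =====

-- B replaces A's split-into-lines / rebuild-list / join-with-'\n' pipeline with a single
-- streaming character pass that emits each finished segment directly (alternative structure,
-- same return value; no speed claim).

-- ===== PORT A =====
-- literal transliteration of A: split on '\n', rebuild the line list (three lines per hit), join with '\n'
def fix_infinite_loop (code : String) : String :=
  let lines := PySem.Chars.splitOn code.toList "\n".toList
  let fixed := lines.foldl (fun fixed line =>
    if PySem.Chars.isIn "while True:".toList line then
      fixed ++ ["    counter = 0".toList,
                "    while counter < 1000:  # Safety limit".toList,
                "        counter += 1".toList]
    else fixed ++ [line]) []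
  String.mk (PySem.Chars.join "\n".toList fixed)

-- ===== PORT B =====
def pvRepl : List Char :=
  "    counter = 0\n    while counter < 1000:  # Safety limit\n        counter += 1".toList

-- B's per-segment emit: the finished segment, replaced if it contains the pattern
def pvFixSeg (seg : List Char) : List Char :=
  if PySem.Chars.isIn "while True:".toList seg then pvRepl else seg

-- B's streaming loop: cur = characters of the current segment so far, second arg = input left
def pvSub (cur : List Char) : List Char → List Char
  | [] => pvFixSeg cur
  | c :: rest => if c = '\n' then pvFixSeg cur ++ '\n' :: pvSub [] rest
                 else pvSub (cur ++ [c]) rest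

def fix_infinite_loop_alt (code : String) : String :=
  String.mk (pvSub [] code.toList)

-- ===== PRECONDITION & SPEC =====
def Spec_fix_infinite_loop (code : String) (out : String) : Prop := out = fix_infinite_loop_alt code
instance (code : String) (out : String) : Decidable (Spec_fix_infinite_loop code out) := by unfold Spec_fix_infinite_loop; infer_instance

-- ===== CLAIM (what is proved, stated in full; the proofs are below) =====
def Claim_equal_fix_infinite_loop : Prop := ∀ (code : String), Dom_fix_infinite_loop code → Spec_fix_infinite_loop code (fix_infinite_loop code)

-- ===== LEMMAS AND PROOFS =====

-- reference split: cur = current segment so far, recursing over the rest of the input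
def mySplit (cur : List Char) : List Char → List (List Char)
  | [] => [cur]
  | c :: rest => if c = '\n' then cur :: mySplit [] rest else mySplit (cur ++ [c]) rest

-- the group of output lines A appends for one input line
def hGrp (line : List Char) : List (List Char) :=
  if PySem.Chars.isIn "while True:".toList line then
    ["    counter = 0".toList,
     "    while counter < 1000:  # Safety limit".toList,
     "        counter += 1".toList]
  else [line]

theorem go_eq : ∀ (l : List Char) (fuel : Nat) (cur : List Char) (acc : List (List Char)), l.length < fuel →
    PySem.Chars.splitOn.go ['\n'] fuel l cur acc = acc.reverse ++ mySplit cur.reverse l := by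
  intro l
  induction l with
  | nil =>
    intro fuel cur acc h
    match fuel, h with
    | fuel+1, _ => simp [PySem.Chars.splitOn.go, mySplit]
  | cons c rest ih =>
    intro fuel cur acc h
    match fuel, h with
    | fuel+1, h =>
      rw [PySem.Chars.splitOn.go]
      by_cases hc : c = '\n'
      · subst hc
        simp only [List.length_cons, List.length_nil, Nat.zero_add, List.drop_one, List.tail_cons]
        rw [ih fuel [] (cur.reverse :: acc) (by simpa using Nat.lt_of_succ_lt_succ h)]
        simp [mySplit]
      · have hp : List.isPrefixOf ['\n'] (c :: rest) = false := by
          simp [List.isPrefixOf, Ne.symm hc]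
        rw [hp]
        simp only [Bool.false_eq_true, if_false]
        rw [ih fuel (c :: cur) acc (by simpa using Nat.lt_of_succ_lt_succ h)]
        simp [mySplit, hc]

theorem splitOn_eq_mySplit (s : List Char) : PySem.Chars.splitOn s ['\n'] = mySplit [] s := by
  rw [PySem.Chars.splitOn, go_eq s (s.length+1) [] [] (Nat.lt_succ_self _)]
  simp

theorem pvRepl_eq : pvRepl =
    "    counter = 0".toList ++ '\n' :: "    while counter < 1000:  # Safety limit".toList
      ++ '\n' :: "        counter += 1".toList := by decide

theorem join_hGrp (seg : List Char) :
    PySem.Chars.join ['\n'] (hGrp seg) = pvFixSeg seg := by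
  unfold hGrp pvFixSeg
  split
  · rw [PySem.Chars.join_cons_cons, PySem.Chars.join_cons_cons, PySem.Chars.join_singleton, pvRepl_eq]
    simp
  · exact PySem.Chars.join_singleton _ _

theorem join_hGrp_append (seg F' : List Char) (FS : List (List Char)) :
    PySem.Chars.join ['\n'] (hGrp seg ++ (F' :: FS)) =
      pvFixSeg seg ++ '\n' :: PySem.Chars.join ['\n'] (F' :: FS) := by
  unfold hGrp pvFixSeg
  split
  · rw [show (["    counter = 0".toList, "    while counter < 1000:  # Safety limit".toList,
        "        counter += 1".toList] ++ (F' :: FS)) = ("    counter = 0".toList ::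
        "    while counter < 1000:  # Safety limit".toList :: "        counter += 1".toList
        :: F' :: FS) from rfl]
    rw [PySem.Chars.join_cons_cons, PySem.Chars.join_cons_cons, PySem.Chars.join_cons_cons, pvRepl_eq]
    simp
  · rw [show (([seg] : List (List Char)) ++ (F' :: FS)) = (seg :: F' :: FS) from rfl]
    rw [PySem.Chars.join_cons_cons]
    simp

theorem mySplit_flatMap_ne_nil (l cur : List Char) : (mySplit cur l).flatMap hGrp ≠ [] := by
  induction l generalizing cur with
  | nil =>
    unfold mySplit
    simp only [List.flatMap_cons, List.flatMap_nil, List.append_nil]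
    unfold hGrp
    split <;> simp
  | cons c rest ih =>
    unfold mySplit
    by_cases hc : c = '\n'
    · subst hc
      simp only [if_pos rfl, List.flatMap_cons]
      intro h
      rcases List.append_eq_nil_iff.mp h with ⟨h1, h2⟩
      exact ih [] h2
    · rw [if_neg hc]; exact ih _

theorem main_lemma (l : List Char) : ∀ cur,
    PySem.Chars.join ['\n'] ((mySplit cur l).flatMap hGrp) = pvSub cur l := by
  induction l with
  | nil =>
    intro cur
    unfold mySplit pvSub
    simp only [List.flatMap_cons, List.flatMap_nil, List.append_nil]
    exact join_hGrp cur
  | cons c rest ih =>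
    intro cur
    unfold mySplit pvSub
    by_cases hc : c = '\n'
    · subst hc
      rw [if_pos rfl, if_pos rfl]
      simp only [List.flatMap_cons]
      obtain ⟨F', FS, hF⟩ := List.exists_cons_of_ne_nil (mySplit_flatMap_ne_nil rest [])
      rw [hF, join_hGrp_append, ← hF, ih []]
    · rw [if_neg hc, if_neg hc]
      exact ih _

-- ===== VERDICT (by name: the statement is the Claim_ definition above) =====
theorem fix_infinite_loop_spec : Claim_equal_fix_infinite_loop := by
  intro code _
  unfold Spec_fix_infinite_loop fix_infinite_loop fix_infinite_loop_alt
  show String.mk (PySem.Chars.join "\n".toList _) = _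
  have hsep : "\n".toList = ['\n'] := rfl
  rw [hsep]
  have hf : ∀ (init : List (List Char)) (lines : List (List Char)),
      lines.foldl (fun fixed line =>
        if PySem.Chars.isIn "while True:".toList line = true then
          fixed ++ ["    counter = 0".toList,
                    "    while counter < 1000:  # Safety limit".toList,
                    "        counter += 1".toList]
        else fixed ++ [line]) init = init ++ lines.flatMap hGrp := by
    intro init lines
    rw [← PySem.List.foldl_append_eq_flatMap hGrp lines init]
    have hstep : (fun (fixed : List (List Char)) line =>
        if PySem.Chars.isIn "while True:".toList line = true then
          fixed ++ ["    counter = 0".toList,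
                    "    while counter < 1000:  # Safety limit".toList,
                    "        counter += 1".toList]
        else fixed ++ [line]) = (fun acc x => acc ++ hGrp x) := by
      funext a x
      unfold hGrp
      split <;> rfl
    rw [hstep]
  rw [hf, splitOn_eq_mySplit, List.nil_append, main_lemma]
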